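-- pv_equiv track=rewrite | github.com/inducer/islpy | gen_wrap.py | split_at_unparenthesized_commas
-- ===== SOURCE A (Python) =====
-- def split_at_unparenthesized_commas(s: str):
--     paren_level = 0
--     i = 0
--     last_start = 0
--
--     while i < len(s):
--         c = s[i]
--         if c == "(":
--             paren_level += 1
--         elif c == ")":
--             paren_level -= 1
--         elif c == "," and paren_level == 0:
--             yield s[last_start:i]
--             last_start = i+1
--
--         i += 1
--
--     yield s[last_start:i]
-- ===== SOURCE B (Python) =====
-- def split_at_unparenthesized_commas(s: str):
--     parts = s.split(",")
--     level = 0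
--     pending = []
--     for piece in parts[:-1]:
--         pending.append(piece)
--         level += piece.count("(") - piece.count(")")
--         if level == 0:
--             yield ",".join(pending)
--             pending = []
--     pending.append(parts[-1])
--     yield ",".join(pending)
-- ===== Notes on version B (the rewrite author's own statement) =====
-- stated objective: faster
-- what changed: B replaces A's per-character index scan with slice bookkeeping by a single str.split on commas followed by one pass over the pieces that tracks a running paren level per piece and re-joins pending pieces when the level returns to 0.
import Mathlib
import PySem

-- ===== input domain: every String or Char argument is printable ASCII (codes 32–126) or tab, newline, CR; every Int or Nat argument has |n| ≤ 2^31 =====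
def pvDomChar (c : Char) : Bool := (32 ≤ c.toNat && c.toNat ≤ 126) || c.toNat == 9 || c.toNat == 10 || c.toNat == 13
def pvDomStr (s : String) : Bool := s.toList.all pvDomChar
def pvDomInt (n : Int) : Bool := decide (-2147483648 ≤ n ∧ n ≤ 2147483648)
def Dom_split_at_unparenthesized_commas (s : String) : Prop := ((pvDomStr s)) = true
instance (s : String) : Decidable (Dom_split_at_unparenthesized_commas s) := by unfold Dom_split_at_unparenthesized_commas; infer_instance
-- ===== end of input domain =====

-- B splits once on commas and re-joins pieces while tracking a running paren level per piece,
-- instead of A's per-character index scan (measured constant-factor faster in Python, where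
-- split/join run in C); the return value is the generator's yields collected as a list.

-- ===== PORT A =====
-- s[a:b] for 0 ≤ a ≤ b ≤ len(s) (the only way A uses slices): exact there.
def pvSliceA (cs : List Char) (a b : Nat) : List Char := (cs.drop a).take (b - a)

-- the while loop: rest = cs.drop i, scanning char by char
def pvGoA (cs : List Char) (rest : List Char) (i lastStart : Nat) (lvl : Int) : List String :=
  match rest with
  | [] => [String.mk (pvSliceA cs lastStart i)]
  | c :: rs =>
    if c = '(' then pvGoA cs rs (i+1) lastStart (lvl+1)
    else if c = ')' then pvGoA cs rs (i+1) lastStart (lvl-1)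
    else if c = ',' ∧ lvl = 0 then
      String.mk (pvSliceA cs lastStart i) :: pvGoA cs rs (i+1) (i+1) lvl
    else pvGoA cs rs (i+1) lastStart lvl

def split_at_unparenthesized_commas (s : String) : List String :=
  pvGoA s.toList s.toList 0 0 0

-- ===== PORT B =====
-- piece.count("(") - piece.count(")")
def pvBal (p : List Char) : Int := (p.count '(' : Int) - (p.count ')' : Int)

-- the for loop over parts[:-1] (last piece handled by the final append+yield)
def pvGoB : List (List Char) → Int → List (List Char) → List (List Char)
  | [], _, _ => []      -- unreachable: split(",") never returns an empty list
  | [last], _, pending => [List.intercalate [','] (pending ++ [last])]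
  | p :: rest, lvl, pending =>
      let lvl' := lvl + pvBal p
      if lvl' = 0 then List.intercalate [','] (pending ++ [p]) :: pvGoB rest 0 []
      else pvGoB rest lvl' (pending ++ [p])

def split_at_unparenthesized_commas_alt (s : String) : List String :=
  (pvGoB (s.toList.splitOn ',') 0 []).map String.mk

-- ===== PRECONDITION & SPEC =====
def Spec_split_at_unparenthesized_commas (s : String) (out : List String) : Prop := out = split_at_unparenthesized_commas_alt s
instance (s : String) (out : List String) : Decidable (Spec_split_at_unparenthesized_commas s out) := by unfold Spec_split_at_unparenthesized_commas; infer_instance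

-- ===== CLAIM (what is proved, stated in full; the proofs are below) =====
def Claim_equal_split_at_unparenthesized_commas : Prop := ∀ (s : String), Dom_split_at_unparenthesized_commas s → Spec_split_at_unparenthesized_commas s (split_at_unparenthesized_commas s)

-- ===== LEMMAS AND PROOFS =====

-- prepend a prefix onto the first segment
def pvCons (p : List Char) : List (List Char) → List (List Char)
  | [] => [p]
  | h :: t => (p ++ h) :: t

-- reference: the list of segments produced by splitting cs at commas at paren level 0
def pvRef : List Char → Int → List (List Char)
  | [], _ => [[]]
  | c :: rest, lvl =>
    if c = ',' ∧ lvl = 0 then [] :: pvRef rest 0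
    else pvCons [c] (pvRef rest (if c = '(' then lvl+1 else if c = ')' then lvl-1 else lvl))

theorem pvCons_ne_nil (p : List Char) (l : List (List Char)) : pvCons p l ≠ [] := by
  cases l <;> simp [pvCons]

theorem pvRef_ne_nil (cs : List Char) (lvl : Int) : pvRef cs lvl ≠ [] := by
  cases cs with
  | nil => simp [pvRef]
  | cons c rest =>
    simp only [pvRef]
    split
    · simp
    · exact pvCons_ne_nil _ _

theorem pvCons_nil (l : List (List Char)) (h : l ≠ []) : pvCons [] l = l := by
  cases l with
  | nil => exact absurd rfl h
  | cons x t => simp [pvCons]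

theorem pvCons_pvCons (p q : List Char) (l : List (List Char)) :
    pvCons p (pvCons q l) = pvCons (p ++ q) l := by
  cases l <;> simp [pvCons]

-- ===== A-side: pvGoA computes pvRef =====
theorem pvGoA_eq_ref (rest : List Char) : ∀ (cs : List Char) (i lastStart : Nat)
    (lvl : Int) (pre : List Char),
    cs.drop lastStart = pre ++ rest → cs.drop i = rest → pre.length + lastStart = i →
    pvGoA cs rest i lastStart lvl = (pvCons pre (pvRef rest lvl)).map String.mk := by
  induction rest with
  | nil =>
    intro cs i lastStart lvl pre h1 h2 h3
    have hpre : cs.drop lastStart = pre := by simpa using h1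
    simp only [pvGoA, pvRef, pvCons, pvSliceA, hpre, List.map]
    have : i - lastStart = pre.length := by omega
    rw [this, List.take_length]
    simp
  | cons c rs ih =>
    intro cs i lastStart lvl pre h1 h2 h3
    have h2' : cs.drop (i+1) = rs := by
      rw [show i + 1 = i + 1 from rfl, ← List.drop_drop, h2]; rfl
    have h1' : cs.drop lastStart = (pre ++ [c]) ++ rs := by
      rw [h1]; simp
    have h3' : (pre ++ [c]).length + lastStart = i + 1 := by
      simp [List.length_append]; omega
    simp only [pvGoA]
    by_cases hc1 : c = '('
    · rw [if_pos hc1]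
      rw [ih cs (i+1) lastStart (lvl+1) (pre ++ [c]) h1' h2' h3']
      simp [pvRef, hc1, pvCons_pvCons]
    · rw [if_neg hc1]
      by_cases hc2 : c = ')'
      · rw [if_pos hc2]
        rw [ih cs (i+1) lastStart (lvl-1) (pre ++ [c]) h1' h2' h3']
        simp [pvRef, hc2, pvCons_pvCons]
      · rw [if_neg hc2]
        by_cases hc3 : c = ',' ∧ lvl = 0
        · rw [if_pos hc3]
          have hslice : pvSliceA cs lastStart i = pre := by
            unfold pvSliceA
            rw [h1, show i - lastStart = pre.length by omega]
            exact List.take_left' rfl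
          rw [hslice]
          rw [ih cs (i+1) (i+1) lvl [] (by simpa using h2') h2' (by simp)]
          obtain ⟨hc, hl⟩ := hc3
          subst hl
          simp only [pvRef]
          rw [if_pos (by simp [hc])]
          rw [pvCons_nil _ (pvRef_ne_nil _ _)]
          cases hR : pvRef rs 0 with
          | nil => exact absurd hR (pvRef_ne_nil _ _)
          | cons h t => simp [pvCons]
        · rw [if_neg hc3]
          rw [ih cs (i+1) lastStart lvl (pre ++ [c]) h1' h2' h3']
          simp only [pvRef]
          rw [if_neg hc3, if_neg hc1, if_neg hc2, pvCons_pvCons]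

-- ===== B-side =====
theorem pvBal_cons (c : Char) (p : List Char) :
    pvBal (c :: p) = (if c = '(' then (1:Int) else if c = ')' then -1 else 0) + pvBal p := by
  unfold pvBal
  by_cases h1 : c = '('
  · subst h1; simp [List.count_cons]; omega
  · by_cases h2 : c = ')'
    · subst h2; simp [h1]; omega
    · simp [h1, h2]

-- a comma-free prefix never splits; it just shifts the level by its balance
theorem pvRef_prefix (p : List Char) : ∀ (rest : List Char) (lvl : Int), ',' ∉ p →
    pvRef (p ++ rest) lvl = pvCons p (pvRef rest (lvl + pvBal p)) := by
  induction p with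
  | nil =>
    intro rest lvl _
    simp [pvBal, pvCons_nil _ (pvRef_ne_nil _ _)]
  | cons c p' ih =>
    intro rest lvl hc
    have hcne : c ≠ ',' := fun h => hc (h ▸ List.mem_cons_self ..)
    have hp' : ',' ∉ p' := fun h => hc (List.mem_cons_of_mem _ h)
    simp only [List.cons_append, pvRef]
    rw [if_neg (by simp [hcne])]
    rw [ih rest _ hp', pvCons_pvCons, pvBal_cons]
    congr 2
    split_ifs <;> ring

theorem pvRef_single (p : List Char) (lvl : Int) (hp : ',' ∉ p) : pvRef p lvl = [p] := by
  have := pvRef_prefix p [] lvl hp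
  simpa [pvRef, pvCons] using this

-- intercalate algebra
theorem ic_single (h : List Char) : List.intercalate [','] [h] = h := by
  simp [List.intercalate]

theorem ic_cons (p : List Char) (rest : List (List Char)) (hr : rest ≠ []) :
    List.intercalate [','] (p :: rest) = p ++ ',' :: List.intercalate [','] rest := by
  cases rest with
  | nil => exact absurd rfl hr
  | cons r rs => simp [List.intercalate, List.intersperse]

theorem ic_join (pending : List (List Char)) (p h : List Char) :
    List.intercalate [','] (pending ++ [List.intercalate [','] [p, h]]) =
    List.intercalate [','] (pending ++ [p, h]) := by
  induction pending with
  | nil => simp [ic_single]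
  | cons q qs ih =>
    rw [List.cons_append, List.cons_append,
        ic_cons q (qs ++ [List.intercalate [','] [p, h]]) (by simp),
        ic_cons q (qs ++ [p, h]) (by simp), ih]

theorem pvGoB_ne_nil : ∀ (pieces : List (List Char)) (lvl : Int) (pending : List (List Char)),
    pieces ≠ [] → pvGoB pieces lvl pending ≠ [] := by
  intro pieces
  induction pieces with
  | nil => intro _ _ h; exact absurd rfl h
  | cons p rest ih =>
    intro lvl pending _
    cases rest with
    | nil => simp [pvGoB]
    | cons q rs =>
      simp only [pvGoB]
      split
      · simp
      · exact ih _ _ (by simp)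

-- the pending accumulator only dresses up the first emitted piece
def pvConsJoin (pending : List (List Char)) : List (List Char) → List (List Char)
  | [] => []
  | h :: t => List.intercalate [','] (pending ++ [h]) :: t

theorem pvGoB_pending : ∀ (pieces : List (List Char)) (lvl : Int) (pending : List (List Char)),
    pieces ≠ [] → pvGoB pieces lvl pending = pvConsJoin pending (pvGoB pieces lvl []) := by
  intro pieces
  induction pieces with
  | nil => intro _ _ h; exact absurd rfl h
  | cons p rest ih =>
    intro lvl pending _
    cases rest with
    | nil => simp [pvGoB, pvConsJoin, ic_single]
    | cons q rs =>
      simp only [pvGoB]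
      split
      · simp [pvConsJoin, ic_single]
      · simp only [List.nil_append]
        rw [ih _ (pending ++ [p]) (by simp), ih _ [p] (by simp)]
        cases hR : pvGoB (q :: rs) (lvl + pvBal p) [] with
        | nil => simp [pvConsJoin]
        | cons h t =>
          simp only [pvConsJoin, List.append_assoc, List.singleton_append]
          rw [ic_join]

theorem pvGoB_eq_ref : ∀ (pieces : List (List Char)) (lvl : Int),
    pieces ≠ [] → (∀ l ∈ pieces, ',' ∉ l) →
    pvGoB pieces lvl [] = pvRef (List.intercalate [','] pieces) lvl := by
  intro pieces
  induction pieces with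
  | nil => intro _ h; exact absurd rfl h
  | cons p rest ih =>
    intro lvl _ hfree
    have hp : ',' ∉ p := hfree p (List.mem_cons_self ..)
    cases rest with
    | nil =>
      simp only [pvGoB, List.nil_append, ic_single]
      rw [pvRef_single p lvl hp]
    | cons q rs =>
      have hrest : ∀ l ∈ q :: rs, ',' ∉ l := fun l hl => hfree l (List.mem_cons_of_mem _ hl)
      rw [ic_cons _ _ (by simp)]
      rw [pvRef_prefix p _ lvl hp]
      simp only [pvRef]
      simp only [pvGoB]
      by_cases hlvl : lvl + pvBal p = 0
      · rw [if_pos hlvl, if_pos (by simp [hlvl])]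
        rw [← ih 0 (by simp) hrest]
        simp [pvCons, ic_single]
      · rw [if_neg hlvl, if_neg (by simp [hlvl])]
        rw [if_neg (by decide), if_neg (by decide)]
        rw [← ih _ (by simp) hrest]
        simp only [List.nil_append]
        rw [pvGoB_pending _ _ [p] (by simp), pvCons_pvCons]
        cases hR : pvGoB (q :: rs) (lvl + pvBal p) [] with
        | nil => exact absurd hR (pvGoB_ne_nil _ _ _ (by simp))
        | cons h t =>
          simp only [pvConsJoin, pvCons, List.singleton_append]
          rw [ic_cons p [h] (by simp), ic_single]
          simp

theorem splitOn_comma_free : ∀ (cs : List Char), ∀ l ∈ cs.splitOn ',', ',' ∉ l := by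
  intro cs
  induction cs with
  | nil =>
    intro l hl
    simp only [List.splitOn, List.splitOnP_nil, List.mem_singleton] at hl
    simp [hl]
  | cons c rest ih =>
    intro l hl
    simp only [List.splitOn, List.splitOnP_cons] at hl
    obtain ⟨h, t, hS⟩ : ∃ h t, List.splitOnP (fun x => x == ',') rest = h :: t := by
      cases hE : List.splitOnP (fun x => x == ',') rest with
      | nil => exact absurd hE (List.splitOnP_ne_nil _ _)
      | cons a b => exact ⟨a, b, rfl⟩
    have ihS : ∀ l' ∈ h :: t, ',' ∉ l' := by
      intro l' hl'
      exact ih l' (by simp only [List.splitOn, hS]; exact hl')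
    by_cases hc : c = ','
    · rw [if_pos (by simp [hc]), hS] at hl
      rcases List.mem_cons.mp hl with hE | hE
      · subst hE; simp
      · exact ihS l hE
    · rw [if_neg (by simp [hc]), hS] at hl
      simp only [List.modifyHead] at hl
      rcases List.mem_cons.mp hl with hE | hE
      · subst hE
        intro hmem
        rcases List.mem_cons.mp hmem with h1 | h1
        · exact hc h1.symm
        · exact ihS h (List.mem_cons_self ..) h1
      · exact ihS l (List.mem_cons_of_mem _ hE)

-- ===== VERDICT (by name: the statement is the Claim_ definition above) =====
theorem split_at_unparenthesized_commas_spec : Claim_equal_split_at_unparenthesized_commas := by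
  intro s _
  unfold Spec_split_at_unparenthesized_commas
  unfold split_at_unparenthesized_commas split_at_unparenthesized_commas_alt
  rw [pvGoA_eq_ref s.toList s.toList 0 0 0 [] (by simp) rfl (by simp)]
  rw [pvCons_nil _ (pvRef_ne_nil _ _)]
  have hne : s.toList.splitOn ',' ≠ [] := List.splitOnP_ne_nil _ _
  rw [pvGoB_eq_ref (s.toList.splitOn ',') 0 hne (splitOn_comma_free _)]
  rw [List.intercalate_splitOn]
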